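-- pv_equiv track=rewrite | github.com/Makochino/python-basics-practice | DataStructures/Stack/Removing Duplicate Letters.py | rdl_by_k
-- ===== SOURCE A (Python) =====
-- def rdl_by_k(s):
--     k = 3
--     stack = []
--     for char in s:
--         if stack and stack[-1][0] == char:
--             stack[-1][1] += 1
--             if stack[-1][1] == k:
--                 stack.pop()
--         else:
--             stack.append([char, 1])
--
--     result = ''
--     for char, count in stack:
--         result += char * count
--     return result
-- ===== SOURCE B (Python) =====
-- def rdl_by_k(s):
--     # right-to-left single pass: build the result back-to-front, popping a
--     # pending pair whenever the current char would complete a run of three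
--     res = []  # result in reverse order; res[-1] is the front of the output
--     for c in reversed(s):
--         if len(res) >= 2 and res[-1] == c and res[-2] == c:
--             res.pop()
--             res.pop()
--         else:
--             res.append(c)
--     return ''.join(reversed(res))
-- ===== Notes on version B (the rewrite author's own statement) =====
-- stated objective: alternative
-- what changed: B scans the string right-to-left building the output back-to-front as a plain char list (popping the pending pair when a char completes a run of three), instead of A's left-to-right [char,count] stack flattened at the end; equality rests on the order-independence of triple removal.
import Mathlib
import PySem

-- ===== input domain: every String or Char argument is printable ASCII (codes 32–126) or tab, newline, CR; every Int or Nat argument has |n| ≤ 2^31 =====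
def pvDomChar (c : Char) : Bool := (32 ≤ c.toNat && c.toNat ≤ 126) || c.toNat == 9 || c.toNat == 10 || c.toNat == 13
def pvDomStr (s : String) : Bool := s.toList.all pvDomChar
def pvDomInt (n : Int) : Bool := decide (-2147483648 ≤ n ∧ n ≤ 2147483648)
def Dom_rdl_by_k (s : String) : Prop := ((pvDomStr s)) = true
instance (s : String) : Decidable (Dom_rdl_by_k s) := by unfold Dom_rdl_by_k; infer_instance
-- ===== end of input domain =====

-- B replaces A's left-to-right [char,count] stack (flattened at the end) by a right-to-left
-- single pass that builds the output back-to-front as a plain char list; same O(n) cost.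


-- ===== PORT A =====
-- one step of A's loop body; stack head = Python stack top (stack[-1]), counts reach at most 2
def rdlStepA (st : List (Char × Nat)) (c : Char) : List (Char × Nat) :=
  match st with
  | [] => [(c, 1)]
  | (c0, n) :: rest =>
    if c0 = c then (if n + 1 = 3 then rest else (c0, n + 1) :: rest)
    else (c, 1) :: (c0, n) :: rest

-- 'result += char * count' over the stack bottom-to-top (= our list reversed)
def rdl_by_k (s : String) : String :=
  String.mk (((s.toList.foldl rdlStepA []).reverse).foldl
    (fun r p => r ++ List.replicate p.2 p.1) [])

-- ===== PORT B =====
-- Source B loop body; r = Python 'res' reversed, so res[-1] / res[-2] are r's first two elements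
def rdlPush (r : List Char) (c : Char) : List Char :=
  match r with
  | a :: b :: t => if a = c ∧ b = c then t else c :: a :: b :: t
  | _ => c :: r

-- for c in reversed(s): …  then ''.join(reversed(res)) = String.mk r
def rdl_by_k_alt (s : String) : String :=
  String.mk ((s.toList.reverse).foldl rdlPush [])

-- ===== PRECONDITION & SPEC =====
def Spec_rdl_by_k (s : String) (out : String) : Prop := out = rdl_by_k_alt s
instance (s : String) (out : String) : Decidable (Spec_rdl_by_k s out) := by unfold Spec_rdl_by_k; infer_instance

-- ===== CLAIM (what is proved, stated in full; the proofs are below) =====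
def Claim_equal_rdl_by_k : Prop := ∀ (s : String), Dom_rdl_by_k s → Spec_rdl_by_k s (rdl_by_k s)

-- ===== LEMMAS AND PROOFS =====

-- "no three consecutive equal characters"
def NT (l : List Char) : Prop := ∀ c : Char, ¬ ([c, c, c] <:+: l)

def rdlFlat (st : List (Char × Nat)) : List Char :=
  st.flatMap (fun p => List.replicate p.2 p.1)

-- invariant of A's stack: counts are 1 or 2, adjacent entries carry distinct characters
def rdlInv : List (Char × Nat) → Prop
  | [] => True
  | (c, n) :: rest =>
      (n = 1 ∨ n = 2) ∧ (∀ c' m, rest.head? = some (c', m) → c' ≠ c) ∧ rdlInv rest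

lemma NT_nil : NT ([] : List Char) := by
  intro c h
  simp [List.infix_nil] at h

lemma NT_tail {a : Char} {t : List Char} (h : NT (a :: t)) : NT t := by
  intro c hc
  exact h c (hc.trans (List.suffix_cons a t).isInfix)

lemma NT_rev {l : List Char} (h : NT l) : NT l.reverse := by
  intro c hc
  exact h c (List.reverse_infix.mp (by simpa using hc))

lemma NT_push (c : Char) {r : List Char} (h : NT r) : NT (rdlPush r c) := by
  rcases r with _ | ⟨a, _ | ⟨b, t⟩⟩
  · intro d hd
    rcases List.infix_cons_iff.mp hd with hp | hi
    · rcases hp with ⟨u, hu⟩; simp [List.cons.injEq] at hu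
    · exact NT_nil d hi
  · intro d hd
    rcases List.infix_cons_iff.mp hd with hp | hi
    · rcases hp with ⟨u, hu⟩; simp [List.cons.injEq] at hu
    · exact h d hi
  · by_cases hab : a = c ∧ b = c
    · simpa [rdlPush, hab] using NT_tail (NT_tail h)
    · intro d hd
      rw [show rdlPush (a :: b :: t) c = c :: a :: b :: t from by simp [rdlPush, hab]] at hd
      rcases List.infix_cons_iff.mp hd with hp | hi
      · rcases hp with ⟨u, hu⟩
        simp [List.cons.injEq] at hu
        obtain ⟨rfl, rfl, rfl, -⟩ := hu
        exact hab ⟨rfl, rfl⟩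
      · exact h d hi

-- pushing three equal characters onto a triple-free list is the identity
lemma rdl_triple (c : Char) {r : List Char} (h : NT r) :
    rdlPush (rdlPush (rdlPush r c) c) c = r := by
  rcases r with _ | ⟨a, _ | ⟨b, t⟩⟩
  · simp [rdlPush]
  · by_cases hx : a = c
    · simp [rdlPush, hx]
    · simp [rdlPush, hx]
  · by_cases hab : a = c ∧ b = c
    · obtain ⟨ha, hb⟩ := hab
      have ht : ∀ t', t ≠ c :: t' := by
        intro t' ht'
        exact h c ⟨[], t', by simp [ht', ha, hb]⟩
      rcases t with _ | ⟨y, t2⟩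
      · simp [rdlPush, ha, hb]
      · have hy : y ≠ c := fun h' => ht t2 (by rw [h'])
        rcases t2 with _ | ⟨z, t3⟩
        · simp [rdlPush, ha, hb, hy]
        · simp [rdlPush, ha, hb, hy]
    · by_cases ha : a = c
      · have hb : b ≠ c := fun h' => hab ⟨ha, h'⟩
        subst ha
        rcases t with _ | ⟨z, t'⟩
        · simp [rdlPush, hb]
        · simp [rdlPush, hb]
      · simp [rdlPush, ha]

-- B's scan leaves a triple-free list unchanged
lemma rdl_fix {xs : List Char} (h : NT xs) :
    xs.foldr (fun c r => rdlPush r c) [] = xs := by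
  induction xs with
  | nil => rfl
  | cons a t ih =>
    rw [List.foldr_cons, ih (NT_tail h)]
    rcases t with _ | ⟨b, _ | ⟨b', t'⟩⟩
    · rfl
    · rfl
    · have hno : ¬ (b = a ∧ b' = a) := by
        rintro ⟨hb, hb'⟩
        exact h a ⟨[], t', by simp [hb, hb']⟩
      simp [rdlPush, hno]

-- B's result is triple-free
lemma NT_B (l : List Char) : NT (l.foldr (fun c r => rdlPush r c) []) := by
  induction l with
  | nil => exact NT_nil
  | cons c l ih => exact NT_push c ih

-- one step of the left scan, replayed on the right-to-left side
lemma rdl_PL (acc : List Char) (c : Char) {r : List Char} (h : NT r) :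
    (rdlPush acc c).reverse.foldr (fun c r => rdlPush r c) r
      = (acc.reverse ++ [c]).foldr (fun c r => rdlPush r c) r := by
  rcases acc with _ | ⟨a, _ | ⟨b, t⟩⟩
  · rfl
  · simp [rdlPush]
  · by_cases hab : a = c ∧ b = c
    · obtain ⟨ha, hb⟩ := hab
      rw [show rdlPush (a :: b :: t) c = t from by simp [rdlPush, ha, hb]]
      have e : (a :: b :: t).reverse ++ [c] = t.reverse ++ [c, c, c] := by
        simp [ha, hb]
      rw [e, List.foldr_append]
      show _ = t.reverse.foldr _ (rdlPush (rdlPush (rdlPush r c) c) c)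
      rw [rdl_triple c h]
    · rw [show rdlPush (a :: b :: t) c = c :: a :: b :: t from by simp [rdlPush, hab]]
      simp

-- main bridge: left scan reversed = right scan, with the already-scanned part pushed on top
lemma rdl_main (l : List Char) : ∀ acc, NT acc →
    (List.foldl rdlPush acc l).reverse
      = acc.reverse.foldr (fun c r => rdlPush r c)
          (l.foldr (fun c r => rdlPush r c) []) := by
  induction l with
  | nil =>
    intro acc h
    simp only [List.foldl_nil, List.foldr_nil]
    exact (rdl_fix (NT_rev h)).symm
  | cons c l ih =>
    intro acc h
    rw [List.foldl_cons, ih _ (NT_push c h)]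
    rw [rdl_PL acc c (NT_B l), List.foldr_append]
    simp

lemma rdlPush_no {r : List Char} {c : Char} (h : ∀ y u, r = y :: u → y ≠ c) :
    rdlPush r c = c :: r := by
  match r with
  | [] => rfl
  | [x] => rfl
  | a :: b :: t => simp [rdlPush, h a (b :: t) rfl]

lemma rdlPush_cons_no {c : Char} {xs : List Char} (h : ∀ y u, xs = y :: u → y ≠ c) :
    rdlPush (c :: xs) c = c :: c :: xs := by
  match xs with
  | [] => rfl
  | y :: u => simp [rdlPush, h y u rfl]

lemma flat_head_ne {rest : List (Char × Nat)} (h : rdlInv rest) {c : Char}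
    (hne : ∀ c' m, rest.head? = some (c', m) → c' ≠ c) :
    ∀ y u, rdlFlat rest = y :: u → y ≠ c := by
  rcases rest with _ | ⟨⟨c1, m⟩, r'⟩
  · intro y u hyu; simp [rdlFlat] at hyu
  · intro y u hyu
    have h' : List.replicate m c1 ++ rdlFlat r' = y :: u := hyu
    have hy : y = c1 := by
      rcases h.1 with rfl | rfl <;> · simp [List.replicate] at h'; exact h'.1.symm
    exact hy ▸ hne c1 m rfl

-- one step of A corresponds to one rdlPush on the flattened stack, preserving the invariant
lemma flat_inv_step {st : List (Char × Nat)} (c : Char) (h : rdlInv st) :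
    rdlInv (rdlStepA st c) ∧ rdlFlat (rdlStepA st c) = rdlPush (rdlFlat st) c := by
  rcases st with _ | ⟨⟨c0, n⟩, rest⟩
  · exact ⟨⟨Or.inl rfl, by simp, trivial⟩, rfl⟩
  · obtain ⟨hn, hadj, hrest⟩ := h
    by_cases hc : c0 = c
    · subst hc
      by_cases h3 : n + 1 = 3
      · have hn2 : n = 2 := by omega
        subst hn2
        have hstep : rdlStepA ((c0, 2) :: rest) c0 = rest := by simp [rdlStepA]
        rw [hstep]
        refine ⟨hrest, ?_⟩
        rw [show rdlFlat ((c0, 2) :: rest) = c0 :: c0 :: rdlFlat rest from by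
          simp [rdlFlat, List.replicate]]
        simp [rdlPush]
      · have hn1 : n = 1 := by rcases hn with h1 | h1 <;> omega
        subst hn1
        have hstep : rdlStepA ((c0, 1) :: rest) c0 = (c0, 2) :: rest := by
          simp [rdlStepA]
        rw [hstep]
        refine ⟨⟨Or.inr rfl, hadj, hrest⟩, ?_⟩
        rw [show rdlFlat ((c0, 1) :: rest) = c0 :: rdlFlat rest from by
          simp [rdlFlat, List.replicate]]
        rw [rdlPush_cons_no (flat_head_ne hrest hadj)]
        simp [rdlFlat, List.replicate]
    · have hstep : rdlStepA ((c0, n) :: rest) c = (c, 1) :: (c0, n) :: rest := by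
        simp [rdlStepA, hc]
      rw [hstep]
      have hadj' : ∀ c' m, (((c0, n) :: rest).head? = some (c', m)) → c' ≠ c := by
        intro c' m hm
        simp at hm
        exact hm.1 ▸ hc
      refine ⟨⟨Or.inl rfl, hadj', hn, hadj, hrest⟩, ?_⟩
      have hhd : ∀ y u, rdlFlat ((c0, n) :: rest) = y :: u → y ≠ c := by
        intro y u hyu
        have h' : List.replicate n c0 ++ rdlFlat rest = y :: u := hyu
        have hy : y = c0 := by
          rcases hn with rfl | rfl <;> · simp [List.replicate] at h'; exact h'.1.symm
        exact hy ▸ hc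
      rw [rdlPush_no hhd]
      simp [rdlFlat, List.replicate]

lemma rdl_scan (l : List Char) : ∀ st, rdlInv st →
    rdlInv (l.foldl rdlStepA st) ∧
      rdlFlat (l.foldl rdlStepA st) = l.foldl rdlPush (rdlFlat st) := by
  induction l with
  | nil => intro st h; exact ⟨h, rfl⟩
  | cons c l ih =>
    intro st h
    obtain ⟨h1, h2⟩ := flat_inv_step c h
    obtain ⟨g1, g2⟩ := ih _ h1
    exact ⟨g1, by simp only [List.foldl_cons]; rw [g2, h2]⟩

lemma foldl_app (l : List (Char × Nat)) : ∀ acc : List Char,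
    l.foldl (fun r p => r ++ List.replicate p.2 p.1) acc
      = acc ++ l.flatMap (fun p => List.replicate p.2 p.1) := by
  induction l with
  | nil => simp
  | cons p l ih => intro acc; simp [ih, List.append_assoc]

-- A's output loop produces the reversed flattening of its (top-first) stack
lemma rdl_out (st : List (Char × Nat)) :
    (st.reverse).foldl (fun r p => r ++ List.replicate p.2 p.1) []
      = (rdlFlat st).reverse := by
  rw [foldl_app, List.nil_append, rdlFlat, List.reverse_flatMap]
  simp [Function.comp_def, List.reverse_replicate]

-- ===== VERDICT (by name: the statement is the Claim_ definition above) =====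
theorem rdl_by_k_spec : Claim_equal_rdl_by_k := by
  unfold Claim_equal_rdl_by_k
  intro s _
  unfold Spec_rdl_by_k rdl_by_k rdl_by_k_alt
  obtain ⟨_, hflat⟩ := rdl_scan s.toList [] trivial
  rw [rdl_out, hflat]
  show String.mk ((List.foldl rdlPush (rdlFlat []) s.toList).reverse) = _
  rw [show rdlFlat [] = [] from rfl, rdl_main s.toList [] NT_nil,
    List.foldl_reverse]
  rfl
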